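-- pv_equiv track=rewrite | github.com/LLNL/Sina | tests/jupyter_test.py | _build_pep8_output
-- ===== SOURCE A (Python) =====
-- import collections
--
-- def _build_pep8_output(result):
--     """
--     Build the PEP8 output based on flake8 results.
--
--     :param result: output from flake8
--     :returns list of flake8 output lines by error
--     """
--     # Aggregate individual errors by error
--     _dict = collections.defaultdict(list)
--     for line in result.split("\n"):
--         if line:
--             parts = line.replace("(", ":").split(":")
--
--             # Restore the colon in a 'missing whitespace' error if removed
--             error = parts[3].strip()
--             key = "{}:'".format(error) if error.endswith("after '") else error
--
--             _dict[key].append("{} ({})".format(parts[1], parts[2]))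
--
--     # Build the output as one error per entry
--     return ["{}: {}".format(k, ", ".join(_dict[k])) for k in
--             sorted(_dict.keys())]
-- ===== SOURCE B (Python) =====
-- def _build_pep8_output(result):
--     """
--     Build the PEP8 output based on flake8 results.
--
--     :param result: output from flake8
--     :returns list of flake8 output lines by error
--     """
--     # One pass: collect (error key, location) pairs in a flat list
--     pairs = []
--     for line in result.split("\n"):
--         if line:
--             parts = line.replace("(", ":").split(":")
--             error = parts[3].strip()
--             key = error + ":'" if error.endswith("after '") else error
--             pairs.append((key, "{} ({})".format(parts[1], parts[2])))
--
--     # Emit one entry per distinct key, keys sorted, locations in input order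
--     return ["{}: {}".format(k, ", ".join(v for kk, v in pairs if kk == k))
--             for k in sorted(set(k for k, _ in pairs))]
-- ===== Notes on version B (the rewrite author's own statement) =====
-- stated objective: alternative
-- what changed: B drops the defaultdict aggregation: it collects the parsed (key, location) pairs in a flat list in one pass, then emits one line per sorted distinct key by scanning the pair list for that key's locations.
import Mathlib
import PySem

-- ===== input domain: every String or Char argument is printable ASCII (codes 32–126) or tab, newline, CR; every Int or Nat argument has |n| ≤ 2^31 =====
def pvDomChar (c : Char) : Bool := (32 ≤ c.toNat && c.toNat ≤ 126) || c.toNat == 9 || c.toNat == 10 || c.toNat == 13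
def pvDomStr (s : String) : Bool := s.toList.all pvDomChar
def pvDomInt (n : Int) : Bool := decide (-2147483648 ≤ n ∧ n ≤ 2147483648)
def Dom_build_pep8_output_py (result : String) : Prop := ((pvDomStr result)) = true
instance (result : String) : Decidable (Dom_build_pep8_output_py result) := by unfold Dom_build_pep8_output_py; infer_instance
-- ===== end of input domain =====

-- B replaces A's defaultdict aggregation by a flat (key, value) pair list scanned once per sorted
-- distinct key (objective: alternative decomposition, no dict; not claimed faster).

-- ===== PORT A =====
-- shared parse of one non-empty line (identical code in both Pythons):
-- parts = line.replace("(", ":").split(":"); error = parts[3].strip();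
-- key = error + ":'" if error.endswith("after '") else error; value = f"{parts[1]} ({parts[2]})"
def pvParseLine (line : List Char) : String × String :=
  let parts := PySem.Chars.splitOn (PySem.Chars.replace line ['('] [':']) [':']
  let error := PySem.Chars.strip (PySem.List.pyGetD parts 3 [])
  let key := if PySem.Chars.endswith error ("after '".toList) then String.ofList error ++ ":'"
             else String.ofList error
  (key, String.ofList (PySem.List.pyGetD parts 1 []) ++ " (" ++ String.ofList (PySem.List.pyGetD parts 2 []) ++ ")")

def build_pep8_output_py (result : String) : List String :=
  let d := (PySem.Chars.splitOn result.toList ['\n']).foldl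
    (fun d line =>
      if line ≠ [] then
        let p := pvParseLine line
        d.modify p.1 [] (fun v => v ++ [p.2])
      else d)
    PySem.Dict.empty
  (PySem.List.sorted d.keys (fun k => k)).map
    (fun k => k ++ ": " ++ PySem.Str.join ", " (d.getD k []))

-- ===== PORT B =====
def build_pep8_output_py_alt (result : String) : List String :=
  let pairs := (PySem.Chars.splitOn result.toList ['\n']).foldl
    (fun acc line => if line ≠ [] then acc ++ [pvParseLine line] else acc) []
  (PySem.List.sorted (PySem.Set.ofList (pairs.map (·.1))) (fun k => k)).map
    (fun k => k ++ ": " ++ PySem.Str.join ", " ((pairs.filter (fun p => p.1 == k)).map (·.2)))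

-- ===== PRECONDITION & SPEC =====
-- Pre_ excludes exactly the inputs where Python A raises IndexError: some non-empty line
-- yields fewer than four parts after the replace-and-split step, so its fourth part is missing.
def Pre_build_pep8_output_py (result : String) : Prop :=
  ∀ line ∈ PySem.Chars.splitOn result.toList ['\n'], line ≠ [] →
    4 ≤ (PySem.Chars.splitOn (PySem.Chars.replace line ['('] [':']) [':']).length
instance (result : String) : Decidable (Pre_build_pep8_output_py result) := by
  unfold Pre_build_pep8_output_py; infer_instance
def pvWitness_build_pep8_output_py : String := "x.py:1:2: E101 bad indent\nx.py:3:4: W291 whitespace"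
def Spec_build_pep8_output_py (result : String) (out : List String) : Prop := out = build_pep8_output_py_alt result
instance (result : String) (out : List String) : Decidable (Spec_build_pep8_output_py result out) := by unfold Spec_build_pep8_output_py; infer_instance

-- ===== CLAIM (what is proved, stated in full; the proofs are below) =====
def Claim_equal_build_pep8_output_py : Prop := ∀ (result : String), Dom_build_pep8_output_py result → Pre_build_pep8_output_py result → Spec_build_pep8_output_py result (build_pep8_output_py result)

-- ===== LEMMAS AND PROOFS =====

-- the (key, value) pairs of the non-empty lines, in input order
def pvPairsOf (ls : List (List Char)) : List (String × String) :=
  (ls.filter (fun l => decide (l ≠ []))).map pvParseLine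

-- A's loop step
def pvStepA (d : PySem.Dict String (List String)) (line : List Char) : PySem.Dict String (List String) :=
  if line ≠ [] then
    let p := pvParseLine line
    d.modify p.1 [] (fun v => v ++ [p.2])
  else d

lemma pvPairsOf_nil : pvPairsOf [] = [] := rfl

lemma pvPairsOf_cons (l : List Char) (ls : List (List Char)) :
    pvPairsOf (l :: ls) = if l ≠ [] then pvParseLine l :: pvPairsOf ls else pvPairsOf ls := by
  by_cases h : l = [] <;> simp [pvPairsOf, h]

lemma pvDict_getD (ls : List (List Char)) (d : PySem.Dict String (List String)) (k : String) :
    (ls.foldl pvStepA d).getD k [] =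
      d.getD k [] ++ ((pvPairsOf ls).filter (fun p => p.1 == k)).map (·.2) := by
  induction ls generalizing d with
  | nil => simp [pvPairsOf_nil]
  | cons l ls ih =>
    rw [List.foldl_cons, ih, pvPairsOf_cons]
    by_cases hl : l = []
    · simp [pvStepA, hl]
    · simp only [hl, ne_eq, not_false_eq_true, if_true, pvStepA]
      by_cases hk : (pvParseLine l).1 = k
      · subst hk
        rw [PySem.Dict.getD_modify_self]
        simp
      · rw [PySem.Dict.getD_modify_of_ne _ _ _ (fun h => hk h.symm)]
        simp [beq_iff_eq, hk]

lemma pvDict_mem_keys (ls : List (List Char)) (d : PySem.Dict String (List String)) (k : String) :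
    k ∈ (ls.foldl pvStepA d).keys ↔ k ∈ d.keys ∨ k ∈ (pvPairsOf ls).map (·.1) := by
  induction ls generalizing d with
  | nil => simp [pvPairsOf_nil]
  | cons l ls ih =>
    rw [List.foldl_cons, ih, pvPairsOf_cons]
    by_cases hl : l = []
    · simp [pvStepA, hl]
    · simp only [hl, ne_eq, not_false_eq_true, if_true, pvStepA]
      rw [← PySem.Dict.contains_iff_mem_keys, PySem.Dict.contains_modify,
        Bool.or_eq_true, beq_iff_eq, PySem.Dict.contains_iff_mem_keys]
      simp only [List.map_cons, List.mem_cons]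
      tauto

lemma pvDict_nodup (ls : List (List Char)) (d : PySem.Dict String (List String))
    (h : d.keys.Nodup) : (ls.foldl pvStepA d).keys.Nodup := by
  induction ls generalizing d with
  | nil => simpa using h
  | cons l ls ih =>
    rw [List.foldl_cons]
    apply ih
    by_cases hl : l = []
    · simpa [pvStepA, hl] using h
    · simp only [pvStepA, hl, ne_eq, not_false_eq_true, if_true]
      rw [PySem.Dict.keys_modify]
      exact PySem.Dict.nodup_keys_insert _ _ _ h

lemma pvPairs_foldl (ls : List (List Char)) (acc : List (String × String)) :
    ls.foldl (fun acc line => if line ≠ [] then acc ++ [pvParseLine line] else acc) acc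
      = acc ++ pvPairsOf ls := by
  induction ls generalizing acc with
  | nil => simp [pvPairsOf_nil]
  | cons l ls ih =>
    rw [List.foldl_cons, pvPairsOf_cons]
    by_cases hl : l = []
    · rw [if_neg (by simp [hl]), if_neg (by simp [hl]), ih]
    · rw [if_pos hl, if_pos hl, ih, List.append_assoc, List.singleton_append]

lemma pvMain (ls : List (List Char)) :
    (PySem.List.sorted (ls.foldl pvStepA PySem.Dict.empty).keys (fun k => k)).map
      (fun k => k ++ ": " ++ PySem.Str.join ", " ((ls.foldl pvStepA PySem.Dict.empty).getD k []))
    = (PySem.List.sorted (PySem.Set.ofList ((pvPairsOf ls).map (fun p => p.1))) (fun k => k)).map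
      (fun k => k ++ ": " ++ PySem.Str.join ", "
        (((pvPairsOf ls).filter (fun p => p.1 == k)).map (fun p => p.2))) := by
  have hkeys : PySem.List.sorted (ls.foldl pvStepA PySem.Dict.empty).keys (fun k => k)
      = PySem.List.sorted (PySem.Set.ofList ((pvPairsOf ls).map (fun p => p.1))) (fun k => k) := by
    apply PySem.List.sorted_eq_sorted_of_perm _ _ _ (fun a b h => h)
    rw [List.perm_ext_iff_of_nodup
      (pvDict_nodup ls PySem.Dict.empty (by simp [PySem.Dict.keys_empty]))
      (PySem.Set.nodup_ofList _)]
    intro a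
    rw [pvDict_mem_keys, PySem.Set.mem_ofList]
    simp [PySem.Dict.keys_empty]
  rw [hkeys]
  apply List.map_congr_left
  intro k _
  rw [pvDict_getD]
  simp [PySem.Dict.getD_empty]

-- ===== VERDICT (by name: the statement is the Claim_ definition above) =====
theorem build_pep8_output_py_spec : Claim_equal_build_pep8_output_py := by
  intro result _ _
  unfold Spec_build_pep8_output_py build_pep8_output_py build_pep8_output_py_alt
  rw [show (fun (d : PySem.Dict String (List String)) (line : List Char) =>
        if line ≠ [] then
          let p := pvParseLine line
          d.modify p.1 [] (fun v => v ++ [p.2])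
        else d) = pvStepA from rfl]
  rw [pvPairs_foldl, List.nil_append]
  exact pvMain (PySem.Chars.splitOn result.toList ['\n'])
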